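-- pv_equiv track=rewrite | github.com/Hagai-Mozes/University-Python | ex4/ex4_205562010.py | find_substring_locations
-- ===== SOURCE A (Python) =====
-- def find_substring_locations(s, k):
--     my_dic={}
--     for i in range(len(s)-k+1):
--         my_str = s[i:i+k]
--         val = my_dic.get(my_str,[])
--         val.append(i)
--         my_dic[my_str]=val
--     return my_dic
-- ===== SOURCE B (Python) =====
-- def find_substring_locations(s, k):
--     # sort-and-group: sort (window, position) pairs, group runs of equal windows,
--     # then order the groups by first position to restore first-occurrence key order
--     pairs = sorted((s[i:i + k], i) for i in range(len(s) - k + 1))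
--     groups = []
--     for sub, i in pairs:
--         if groups and groups[-1][0] == sub:
--             groups[-1][1].append(i)
--         else:
--             groups.append((sub, [i]))
--     groups.sort(key=lambda g: g[1][0])
--     return dict(groups)
-- ===== Notes on version B (the rewrite author's own statement) =====
-- stated objective: alternative
-- what changed: A builds the dict incrementally in one scan (get-default, append, reinsert per position); B sorts the (window, position) pairs, groups runs of equal windows into position lists, and reorders the groups by first position to restore first-occurrence key order.
import Mathlib
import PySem

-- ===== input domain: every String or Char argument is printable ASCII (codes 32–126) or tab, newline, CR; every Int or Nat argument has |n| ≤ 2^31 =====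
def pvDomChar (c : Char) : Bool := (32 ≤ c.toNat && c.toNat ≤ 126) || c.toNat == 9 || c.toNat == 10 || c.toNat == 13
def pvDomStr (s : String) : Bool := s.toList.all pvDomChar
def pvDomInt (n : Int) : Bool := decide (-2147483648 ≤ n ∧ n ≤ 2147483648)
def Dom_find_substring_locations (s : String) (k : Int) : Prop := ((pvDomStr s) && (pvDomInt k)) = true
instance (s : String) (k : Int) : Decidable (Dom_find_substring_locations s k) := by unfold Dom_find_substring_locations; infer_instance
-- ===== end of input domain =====

-- B replaces A's incremental dict-building scan by a sort-and-group decomposition: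
-- sort the (window, position) pairs, group runs of equal windows, reorder groups by first position; alternative, not faster.


-- ===== PORT A =====
def find_substring_locations (s : String) (k : Int) : List (String × List Int) :=
  ((PySem.List.pyRange 0 (PySem.Str.len s - k + 1) 1).foldl
    (fun my_dic i =>
      let my_str := PySem.Str.slice s (some i) (some (i + k))
      let val := my_dic.getD my_str [] ++ [i]
      my_dic.insert my_str val)
    PySem.Dict.empty).items

-- ===== PORT B =====
-- the body of B's grouping loop: extend the last group if its window equals p's, else open a new group
def pvGroupStep (groups : List (String × List Int)) (p : String × Int) : List (String × List Int) :=
  match groups.getLast? with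
  | some g => if g.1 == p.1 then groups.dropLast ++ [(g.1, g.2 ++ [p.2])]
              else groups ++ [(p.1, [p.2])]
  | none => [(p.1, [p.2])]

def find_substring_locations_alt (s : String) (k : Int) : List (String × List Int) :=
  let pairs := PySem.List.sorted2
    ((PySem.List.pyRange 0 (PySem.Str.len s - k + 1) 1).map
      (fun i => (PySem.Str.slice s (some i) (some (i + k)), i)))
    (fun p => p.1) (fun p => p.2) false
  let groups := pairs.foldl pvGroupStep []
  -- Python's sort key g[1][0] is ported as g.2.headI: every group's position list is nonempty, where .headI is exact
  (PySem.Dict.ofList (PySem.List.sorted groups (fun g => g.2.headI) false)).items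

-- ===== PRECONDITION & SPEC =====
def Spec_find_substring_locations (s : String) (k : Int) (out : List (String × List Int)) : Prop := out = find_substring_locations_alt s k
instance (s : String) (k : Int) (out : List (String × List Int)) : Decidable (Spec_find_substring_locations s k out) := by unfold Spec_find_substring_locations; infer_instance

-- ===== CLAIM (what is proved, stated in full; the proofs are below) =====
def Claim_equal_find_substring_locations : Prop := ∀ (s : String) (k : Int), Dom_find_substring_locations s k → Spec_find_substring_locations s k (find_substring_locations s k)

-- ===== LEMMAS AND PROOFS =====

-- abbreviations used only by the proofs
def pvKey (s : String) (k : Int) (i : Int) : String := PySem.Str.slice s (some i) (some (i + k))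
def pvRng (s : String) (k : Int) : List Int := PySem.List.pyRange 0 (PySem.Str.len s - k + 1) 1
def pvBlk (s : String) (k : Int) (c : String) : List Int := (pvRng s k).filter (fun i => pvKey s k i == c)
def pvC (s : String) (k : Int) : List (String × List Int) :=
  (PySem.List.dedup ((pvRng s k).map (pvKey s k))).map (fun c => (c, pvBlk s k c))
-- sorting pairs by the two keys is sorting by the lexicographic key
theorem pv_sorted2_eq_sorted_lex {α κ₁ κ₂ : Type} [LinearOrder κ₁] [LinearOrder κ₂]
    (xs : List α) (k1 : α → κ₁) (k2 : α → κ₂) :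
    PySem.List.sorted2 xs k1 k2 false
      = PySem.List.sorted xs (fun a => toLex (k1 a, k2 a)) false := by
  show List.foldl (fun acc x => PySem.List.insertBy _ x acc) [] xs
      = List.foldl (fun acc x => PySem.List.insertBy _ x acc) [] xs
  have hbefore : (fun a b => decide (k1 a < k1 b) || (!decide (k1 b < k1 a) && decide (k2 a < k2 b)))
      = (fun (a b : α) => decide (toLex (k1 a, k2 a) < toLex (k1 b, k2 b))) := by
    funext a b
    by_cases h1 : k1 a < k1 b
    · simp [h1, Prod.Lex.toLex_lt_toLex]
    · by_cases h2 : k1 b < k1 a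
      · simp [h1, h2, Prod.Lex.toLex_lt_toLex, ne_of_gt h2]
      · have heq : k1 a = k1 b := le_antisymm (not_lt.mp h2) (not_lt.mp h1)
        simp [Prod.Lex.toLex_lt_toLex, heq]
  simp only [if_neg (by decide : ¬ (false = true))] at *
  rw [hbefore]

-- a key-partition of l, over any duplicate-free list of keys covering l, is a permutation of l's pairs
theorem pv_partition_perm {κ : Type} [DecidableEq κ] (cs : List κ) (l : List Int) (f : Int → κ)
    (hnd : cs.Nodup) (hmem : ∀ i ∈ l, f i ∈ cs) :
    (cs.flatMap (fun c => (l.filter (fun i => f i == c)).map (fun i => (c, i)))).Perm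
      (l.map (fun i => (f i, i))) := by
  induction cs generalizing l with
  | nil =>
    have : l = [] := by
      cases l with
      | nil => rfl
      | cons a b => exact absurd (hmem a (by simp)) (by simp)
    simp [this]
  | cons c cs' ih =>
    rw [List.flatMap_cons]
    have hsplit : (List.filter (fun i => f i == c) l ++ List.filter (fun i => !(f i == c)) l).Perm l :=
      List.filter_append_perm _ l
    -- the other keys' filters over l equal those over l' := filter (¬ = c)
    have hrest : ∀ c' ∈ cs', List.filter (fun i => f i == c') l
        = List.filter (fun i => f i == c') (List.filter (fun i => !(f i == c)) l) := by
      intro c' hc'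
      rw [List.filter_filter]
      apply List.filter_congr
      intro i _
      by_cases h : f i = c'
      · have : c' ≠ c := fun h' => (List.nodup_cons.mp hnd).1 (h' ▸ hc')
        simp [h, this]
      · simp [h]
    have hflat : (cs'.flatMap (fun c' => (l.filter (fun i => f i == c')).map (fun i => (c', i))))
        = cs'.flatMap (fun c' => ((List.filter (fun i => !(f i == c)) l).filter (fun i => f i == c')).map (fun i => (c', i))) := by
      apply List.flatMap_congr
      intro c' hc'
      rw [hrest c' hc']
    rw [hflat]
    have h2 := ih (List.filter (fun i => !(f i == c)) l) (List.Nodup.of_cons hnd) (by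
      intro i hi
      obtain ⟨hil, hne⟩ := List.mem_filter.mp hi
      have := hmem i hil
      simp only [Bool.not_eq_eq_eq_not, Bool.not_true, beq_eq_false_iff_ne, ne_eq] at hne
      simpa [hne] using this)
    refine (List.Perm.append_left _ h2).trans ?_
    have h1 : (l.filter (fun i => f i == c)).map (fun i => (c, i))
        = (l.filter (fun i => f i == c)).map (fun i => (f i, i)) := by
      apply List.map_congr_left
      intro i hi
      have := (List.mem_filter.mp hi).2
      simp only [beq_iff_eq] at this
      simp [this]
    rw [h1, ← List.map_append]
    exact hsplit.map _

-- consuming one run of equal windows extends the last group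
theorem pv_run (c : String) (is : List Int) : ∀ (rest : List (String × Int))
    (gs : List (String × List Int)) (v : List Int),
    ((is.map (fun i => (c, i))) ++ rest).foldl pvGroupStep (gs ++ [(c, v)])
      = rest.foldl pvGroupStep (gs ++ [(c, v ++ is)]) := by
  induction is with
  | nil => intro rest gs v; simp
  | cons i t ih =>
    intro rest gs v
    have hstep : pvGroupStep (gs ++ [(c, v)]) (c, i) = gs ++ [(c, v ++ [i])] := by
      simp [pvGroupStep]
    simp only [List.map_cons, List.cons_append, List.foldl_cons, hstep]
    rw [ih rest gs (v ++ [i])]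
    simp

-- the grouping fold over a block-partitioned list produces one group per key
theorem pv_group (blkf : String → List Int) : ∀ (cs : List String)
    (gs : List (String × List Int)), cs.Nodup → (∀ c ∈ cs, blkf c ≠ []) →
    (∀ g c, gs.getLast? = some g → cs.head? = some c → g.1 ≠ c) →
    (cs.flatMap (fun c => (blkf c).map (fun i => (c, i)))).foldl pvGroupStep gs
      = gs ++ cs.map (fun c => (c, blkf c)) := by
  intro cs
  induction cs with
  | nil => intro gs _ _ _; simp
  | cons c cs' ih =>
    intro gs hnd hne hlast
    obtain ⟨i, t, hbl⟩ : ∃ i t, blkf c = i :: t := by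
      cases h : blkf c with
      | nil => exact absurd h (hne c (by simp))
      | cons a b => exact ⟨a, b, rfl⟩
    have hstep : pvGroupStep gs (c, i) = gs ++ [(c, [i])] := by
      cases hgs : gs.getLast? with
      | none => simp [pvGroupStep, List.getLast?_eq_none_iff.mp hgs]
      | some g =>
        have : g.1 ≠ c := hlast g c hgs (by simp)
        simp [pvGroupStep, hgs, this]
    rw [List.flatMap_cons, hbl]
    simp only [List.map_cons, List.cons_append, List.foldl_cons, hstep]
    rw [pv_run c t (cs'.flatMap (fun c => (blkf c).map (fun i => (c, i)))) gs [i]]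
    rw [ih (gs ++ [(c, [i] ++ t)]) hnd.of_cons (fun d hd => hne d (by simp [hd]))
      (by
        intro g d hg hd
        simp only [List.getLast?_concat, Option.some.injEq] at hg
        subst hg
        intro hcd
        have hdm : d ∈ cs' := by
          obtain ⟨ys, hys⟩ := List.head?_eq_some_iff.mp hd
          simp [hys]
        have hcd' : c = d := by simpa using hcd
        exact (List.nodup_cons.mp hnd).1 (hcd' ▸ hdm))]
    simp [hbl]

-- ordered dedup lists keys in strictly increasing order of first position
theorem pv_first_mono (f : Int → String) : ∀ (l : List Int), l.Pairwise (· < ·) →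
    (PySem.List.dedup (l.map f)).Pairwise
      (fun c d => (l.filter (fun i => f i == c)).headI < (l.filter (fun i => f i == d)).headI) := by
  intro l
  induction l with
  | nil => intro _; simp [PySem.List.dedup_eq_ofList, PySem.Set.ofList]
  | cons i t ih =>
    intro hpw
    have hlt : ∀ j ∈ t, i < j := fun j hj => (List.pairwise_cons.mp hpw).1 j hj
    rw [List.map_cons, PySem.List.dedup_eq_ofList, PySem.Set.ofList_cons]
    rw [← PySem.List.dedup_eq_ofList]
    constructor
    · -- f i comes first: its first position is i, any other key's first position is in t
      intro d hd
      have hdne : d ≠ f i := by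
        simp only [PySem.Set.discard, List.mem_filter] at hd
        simpa using hd.2
      have hdmem : d ∈ t.map f := by
        simp only [PySem.Set.discard, List.mem_filter] at hd
        exact (PySem.Set.mem_ofList _ _).mp hd.1
      have hb : (f i == d) = false := by
        simp only [beq_eq_false_iff_ne, ne_eq]
        exact fun h => hdne h.symm
      have h1 : (List.filter (fun j => f j == d) (i :: t)) = List.filter (fun j => f j == d) t := by
        simp [hb]
      have h2 : (List.filter (fun j => f j == f i) (i :: t)).headI = i := by
        simp
      rw [h1, h2]
      obtain ⟨j, hjt, hjd⟩ := List.mem_map.mp hdmem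
      have hne : List.filter (fun j => f j == d) t ≠ [] := by
        intro hnil
        have : j ∈ List.filter (fun j => f j == d) t := List.mem_filter.mpr ⟨hjt, by simp [hjd]⟩
        simp [hnil] at this
      have hmem2 : (List.filter (fun j => f j == d) t).headI ∈ t := by
        cases hc : List.filter (fun j => f j == d) t with
        | nil => exact absurd hc hne
        | cons a b =>
          have : a ∈ List.filter (fun j => f j == d) t := by rw [hc]; exact List.mem_cons_self
          simpa [hc] using List.mem_of_mem_filter this
      exact hlt _ hmem2
    · -- remaining keys: pairwise by the induction hypothesis, filters unchanged by the cons
      have hsub : (PySem.Set.discard (PySem.List.dedup (t.map f)) (f i)).Sublist (PySem.List.dedup (t.map f)) := by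
        simp only [PySem.Set.discard]
        exact List.filter_sublist
      have hpw' := ih (List.pairwise_cons.mp hpw).2
      have := hpw'.sublist hsub
      refine this.imp_of_mem ?_
      intro c d hc hd hrel
      have hcne : c ≠ f i := by
        simp only [PySem.Set.discard, List.mem_filter] at hc
        simpa using hc.2
      have hdne : d ≠ f i := by
        simp only [PySem.Set.discard, List.mem_filter] at hd
        simpa using hd.2
      have hbc : (f i == c) = false := by
        simp only [beq_eq_false_iff_ne, ne_eq]
        exact fun h => hcne h.symm
      have hbd : (f i == d) = false := by
        simp only [beq_eq_false_iff_ne, ne_eq]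
        exact fun h => hdne h.symm
      have hfc : (List.filter (fun j => f j == c) (i :: t)) = List.filter (fun j => f j == c) t := by
        simp [hbc]
      have hfd : (List.filter (fun j => f j == d) (i :: t)) = List.filter (fun j => f j == d) t := by
        simp [hbd]
      rw [hfc, hfd]
      exact hrel

-- A's incremental dict scan produces the canonical form
theorem pv_A_eq (s : String) (k : Int) : find_substring_locations s k = pvC s k := by
  unfold find_substring_locations pvC pvBlk
  set key : Int → String := pvKey s k with hkey
  set rng : List Int := pvRng s k with hrng
  have hA : (rng.foldl
      (fun my_dic i => my_dic.insert (key i) (my_dic.getD (key i) [] ++ [i]))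
      PySem.Dict.empty)
      = ((rng.map (fun i => (key i, i))).foldl
          (fun d p => d.modify p.1 [] (fun v => v ++ [p.2])) PySem.Dict.empty) := by
    rw [List.foldl_map]
    rfl
  show (rng.foldl (fun my_dic i => my_dic.insert (key i) (my_dic.getD (key i) [] ++ [i]))
      PySem.Dict.empty).items = _
  rw [hA]
  have hnd : ((rng.map (fun i => (key i, i))).foldl
      (fun d p => d.modify p.1 [] (fun v => v ++ [p.2])) PySem.Dict.empty).keys.Nodup := by
    rw [List.foldl_map]
    exact PySem.Dict.nodup_keys_foldl_modify_key rng (fun i => key i) []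
      (fun d i v => v ++ [i]) PySem.Dict.empty (by simp [PySem.Dict.keys_empty])
  rw [PySem.Dict.items_eq_map_keys _ hnd []]
  have hkeys : ((rng.map (fun i => (key i, i))).foldl
      (fun d p => d.modify p.1 [] (fun v => v ++ [p.2])) PySem.Dict.empty).keys
      = PySem.List.dedup (rng.map key) := by
    rw [List.foldl_map]
    rw [PySem.Dict.keys_foldl_modify_key rng (fun i => key i) [] (fun d i v => v ++ [i])]
    rw [PySem.List.dedup_eq_ofList, PySem.Set.ofList_eq_foldl]
    simp [PySem.Dict.keys_empty, PySem.Set.update, List.foldl_map]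
  rw [hkeys]
  apply List.map_congr_left
  intro c _
  congr 1
  rw [PySem.Dict.getD_foldl_modify_append]
  simp [List.filter_map, List.map_map, Function.comp_def]

-- B's sort-group-reorder pipeline produces the canonical form
theorem pv_B_eq (s : String) (k : Int) : find_substring_locations_alt s k = pvC s k := by
  rw [show find_substring_locations_alt s k
      = (PySem.Dict.ofList (PySem.List.sorted
          ((PySem.List.sorted2 ((pvRng s k).map (fun i => (pvKey s k i, i)))
            (fun p => p.1) (fun p => p.2) false).foldl pvGroupStep [])
          (fun g => g.2.headI) false)).items from rfl]
  set key : Int → String := pvKey s k with hkey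
  set rng : List Int := pvRng s k with hrng
  set SK : List String := PySem.List.sorted (PySem.List.dedup (rng.map key)) (fun c => c) false with hSK
  have hperm_SK : SK.Perm (PySem.List.dedup (rng.map key)) := PySem.List.sorted_perm _ _ _
  have hnd_SK : SK.Nodup := hperm_SK.nodup_iff.mpr (PySem.List.nodup_dedup _)
  have hmem_SK : ∀ c, c ∈ SK ↔ c ∈ rng.map key := by
    intro c
    rw [hperm_SK.mem_iff, PySem.List.dedup_eq_ofList, PySem.Set.mem_ofList]
  have hpw_SK : SK.Pairwise (· < ·) := by
    have h1 := PySem.List.sorted_pairwise (PySem.List.dedup (rng.map key)) (fun c => c)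
    have h2 : SK.Pairwise (· ≠ ·) := hnd_SK
    exact (h1.and h2).imp (fun h => lt_of_le_of_ne h.1 h.2)
  have hblkne : ∀ c ∈ SK, pvBlk s k c ≠ [] := by
    intro c hc
    obtain ⟨i, hi, hic⟩ := List.mem_map.mp ((hmem_SK c).mp hc)
    intro hnil
    have : i ∈ pvBlk s k c := List.mem_filter.mpr ⟨hi, by simp [pvKey, hkey] at hic ⊢; simp [hic]⟩
    simp [hnil] at this
  have hrng_pw : rng.Pairwise (· < ·) := by
    rw [hrng]; exact PySem.List.pairwise_lt_pyRange_one 0 _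
  -- step 1+2: the sorted pair list is the key-blocks flattened in key order
  have hT : PySem.List.sorted2 (rng.map (fun i => (key i, i))) (fun p => p.1) (fun p => p.2) false
      = SK.flatMap (fun c => (pvBlk s k c).map (fun i => (c, i))) := by
    rw [pv_sorted2_eq_sorted_lex]
    apply PySem.List.sorted_eq_of_perm_of_pairwise_lt
    · exact pv_partition_perm SK rng key hnd_SK (fun i hi => (hmem_SK _).mpr (List.mem_map_of_mem hi))
    · rw [List.flatMap_def, List.pairwise_flatten]
      constructor
      · intro l hl
        obtain ⟨c, hc, rfl⟩ := List.mem_map.mp hl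
        rw [List.pairwise_map]
        have : (pvBlk s k c).Pairwise (· < ·) := hrng_pw.sublist List.filter_sublist
        exact this.imp (fun h => by simp [Prod.Lex.toLex_lt_toLex, h])
      · rw [List.pairwise_map]
        refine hpw_SK.imp_of_mem ?_
        intro c d _ _ hcd x hx y hy
        obtain ⟨i, _, rfl⟩ := List.mem_map.mp hx
        obtain ⟨j, _, rfl⟩ := List.mem_map.mp hy
        simp only [Prod.Lex.toLex_lt_toLex]
        exact Or.inl hcd
  rw [hT]
  -- step 3: grouping the flattened blocks yields one group per key
  rw [pv_group (pvBlk s k) SK [] hnd_SK hblkne (by simp)]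
  rw [List.nil_append]
  -- step 4: the final sort by first position restores first-occurrence order
  have hsort : PySem.List.sorted (SK.map (fun c => (c, pvBlk s k c)))
      (fun g => g.2.headI) false = pvC s k := by
    apply PySem.List.sorted_eq_of_perm_of_pairwise_lt
    · exact (hperm_SK.symm.map _)
    · rw [pvC, List.pairwise_map]
      exact pv_first_mono key rng hrng_pw
  rw [hsort]
  -- step 5: dict() of a pair list with distinct keys is that list
  have hnodupfst : ((pvC s k).map (fun p => p.1)).Nodup := by
    rw [pvC, List.map_map]
    simp [Function.comp_def]
  have := PySem.Dict.items_foldl_insert_fresh (pvC s k) (fun p => p.1) (fun p => p.2)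
    PySem.Dict.empty (fun a _ => PySem.Dict.contains_empty _) hnodupfst
  show (PySem.Dict.update PySem.Dict.empty (pvC s k)).items = pvC s k
  rw [PySem.Dict.update]
  rw [show (fun (acc : PySem.Dict String (List Int)) (p : String × List Int) => acc.insert p.1 p.2)
      = (fun d a => d.insert ((fun p : String × List Int => p.1) a) ((fun p : String × List Int => p.2) a)) from rfl]
  rw [this]
  simp [PySem.Dict.empty]

-- ===== VERDICT (by name: the statement is the Claim_ definition above) =====
theorem find_substring_locations_spec : Claim_equal_find_substring_locations := by
  intro s k _
  unfold Spec_find_substring_locations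
  rw [pv_A_eq, pv_B_eq]
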